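-- pv_equiv track=rewrite | github.com/TrungXibia/6789SieuApp | src/processor.py | get_bacnho_comb_preds
-- ===== SOURCE A (Python) =====
-- from collections import Counter, defaultdict
--
-- def get_bacnho_comb_preds(bn_rows, size=2, n_results=3):
--     """
--     Bạc nhớ tổ hợp (5 Tinh / Hậu Tứ).
--     bn_rows: List of lists (recent 5-digit results).
--     """
--     if not bn_rows or len(bn_rows) < 2: return []
--     import itertools
--     latest = bn_rows[0]
--     # Use only specific positions if it's Hậu Tứ (3,4) or 5 Tinh (all)
--     # This simplified version uses top combos
--     current_set = set(latest)
--     combs = list(itertools.combinations(sorted(list(current_set)), size))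
--
--     future_counts = Counter()
--     for c in combs:
--         c_set = set(c)
--         for j in range(1, len(bn_rows)):
--             h_digits = set(bn_rows[j])
--             if c_set.issubset(h_digits):
--                 # What appeared in the NEXT period (j-1)
--                 next_res = bn_rows[j-1]
--                 for next_c in itertools.combinations(sorted(next_res), 2):
--                     future_counts["".join(map(str, next_c))] += 1
--
--     top = sorted(future_counts.items(), key=lambda x: (-x[1], x[0]))[:n_results]
--     return [x[0] for x in top]
-- ===== SOURCE B (Python) =====
-- def _comb(m, k):
--     # binomial coefficient C(m, k); 0 when k < 0 or k > m
--     if k < 0 or m < k: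
--         return 0
--     r = 1
--     for i in range(k):
--         r = r * (m - i) // (i + 1)
--     return r
--
--
-- def _pair_keys(row):
--     # keys of all 2-combinations of row, recursively (row assumed sorted by caller)
--     if not row:
--         return []
--     head, tail = row[0], row[1:]
--     return ["".join((str(head), str(x))) for x in tail] + _pair_keys(tail)
--
--
-- def get_bacnho_comb_preds(bn_rows, size=2, n_results=3):
--     if len(bn_rows) < 2:
--         return []
--     cur = set(bn_rows[0])
--     # flat weighted stream: each history row j contributes its predecessor's pair
--     # keys with multiplicity C(|cur & row_j|, size)
--     entries = []
--     for j in range(1, len(bn_rows)):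
--         w = _comb(len(cur & set(bn_rows[j])), size)
--         if w > 0:
--             entries.extend((key, w) for key in _pair_keys(sorted(bn_rows[j - 1])))
--     # aggregate by key over the sorted distinct keys
--     keys = sorted(set(k for k, _ in entries))
--     items = [(k, sum(w for k2, w in entries if k2 == k)) for k in keys]
--     top = sorted(items, key=lambda x: (-x[1], x[0]))[:n_results]
--     return [x[0] for x in top]
-- ===== Notes on version B (the rewrite author's own statement) =====
-- stated objective: alternative
-- what changed: B drops A's enumeration of the size-combinations of the latest draw and its per-combination subset test: it streams each predecessor row's pair keys (generated by a recursive helper, not itertools) with a closed-form binomial weight C(|current_set & set(row_j)|, size) into one flat list, then aggregates per distinct key by summing over that list instead of building a Counter.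
import Mathlib
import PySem

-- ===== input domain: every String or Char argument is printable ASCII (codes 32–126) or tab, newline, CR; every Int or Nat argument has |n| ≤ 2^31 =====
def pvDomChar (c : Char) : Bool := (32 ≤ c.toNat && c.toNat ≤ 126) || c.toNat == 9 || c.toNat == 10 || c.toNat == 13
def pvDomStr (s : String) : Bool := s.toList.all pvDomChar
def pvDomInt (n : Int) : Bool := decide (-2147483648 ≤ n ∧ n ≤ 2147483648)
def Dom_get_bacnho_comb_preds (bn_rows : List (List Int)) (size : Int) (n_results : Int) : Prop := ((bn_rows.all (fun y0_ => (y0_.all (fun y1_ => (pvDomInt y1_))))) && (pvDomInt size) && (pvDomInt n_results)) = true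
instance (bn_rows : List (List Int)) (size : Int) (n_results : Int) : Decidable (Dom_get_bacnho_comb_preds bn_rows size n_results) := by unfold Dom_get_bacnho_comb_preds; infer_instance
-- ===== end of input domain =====

-- B replaces A's enumeration of the size-combinations of the latest draw (and the per-combination
-- subset test against every history row) by one flat stream of recursively generated pair keys,
-- each weighted by a closed-form binomial multiplier, aggregated per sorted distinct key
-- (objective: alternative algorithm).

-- ===== PORT A =====
-- "".join(map(str, next_c))
def pvKeyOfPair (c : List Int) : String := PySem.Str.join "" (c.map PySem.Int.toStr)

def get_bacnho_comb_preds (bn_rows : List (List Int)) (size : Int) (n_results : Int) : List String :=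
  if bn_rows.length < 2 then []
  else
    let latest := PySem.List.pyGetD bn_rows 0 []
    let combs := PySem.List.combinations
      (PySem.List.sorted (PySem.Set.ofList latest) (fun x => x)) size.toNat
    let future_counts := combs.foldl (fun d c =>
      (PySem.List.pyRange 1 bn_rows.length).foldl (fun d j =>
        if PySem.Set.issubset (PySem.Set.ofList c)
            (PySem.Set.ofList (PySem.List.pyGetD bn_rows j [])) then
          (PySem.List.combinations
              (PySem.List.sorted (PySem.List.pyGetD bn_rows (j - 1) []) (fun x => x)) 2).foldl
            (fun d nc => d.modify (pvKeyOfPair nc) 0 (· + 1)) d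
        else d) d) PySem.Dict.empty
    (PySem.List.slice
      (PySem.List.sorted2 future_counts.items (fun x => -x.2) (fun x => x.1))
      none (some n_results)).map (fun x => x.1)

-- ===== PORT B =====
-- binomial coefficient C(m, k); 0 when k < 0 or k > m  (the _comb helper of Source B)
def pvComb (m k : Int) : Int :=
  if k < 0 || m < k then 0
  else (PySem.List.pyRange 0 k).foldl
    (fun r i => PySem.Int.floordiv (r * (m - i)) (i + 1)) 1

-- keys of all 2-combinations of a row, recursively (the _pair_keys helper of Source B)
def pvPairKeysRec : List Int → List String
  | [] => []
  | h :: t =>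
      t.map (fun x => PySem.Str.join "" [PySem.Int.toStr h, PySem.Int.toStr x])
        ++ pvPairKeysRec t

def get_bacnho_comb_preds_alt (bn_rows : List (List Int)) (size : Int) (n_results : Int) : List String :=
  if bn_rows.length < 2 then []
  else
    let cur := PySem.Set.ofList (PySem.List.pyGetD bn_rows 0 [])
    let entries := (PySem.List.pyRange 1 bn_rows.length).foldl (fun es j =>
      let w := pvComb
        (PySem.Set.len (PySem.Set.inter cur
          (PySem.Set.ofList (PySem.List.pyGetD bn_rows j [])))) size
      if 0 < w then
        es ++ (pvPairKeysRec
          (PySem.List.sorted (PySem.List.pyGetD bn_rows (j - 1) []) (fun x => x))).map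
            (fun key => (key, w))
      else es) []
    let keys := PySem.List.sorted (PySem.Set.ofList (entries.map (fun e => e.1))) (fun x => x)
    let items := keys.map (fun s =>
      (s, ((entries.filter (fun e => e.1 == s)).map (fun e => e.2)).sum))
    (PySem.List.slice
      (PySem.List.sorted2 items (fun x => -x.2) (fun x => x.1))
      none (some n_results)).map (fun x => x.1)

-- ===== PRECONDITION & SPEC =====
-- Pre_ excludes only negative `size` with at least two rows: there itertools.combinations raises ValueError.
def Pre_get_bacnho_comb_preds (bn_rows : List (List Int)) (size : Int) (n_results : Int) : Prop :=
  bn_rows.length < 2 ∨ 0 ≤ size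
instance (bn_rows : List (List Int)) (size : Int) (n_results : Int) : Decidable (Pre_get_bacnho_comb_preds bn_rows size n_results) := by unfold Pre_get_bacnho_comb_preds; infer_instance
def pvWitness_get_bacnho_comb_preds : List (List Int) × Int × Int := ([[1, 2], [2, 3]], 2, 3)

def Spec_get_bacnho_comb_preds (bn_rows : List (List Int)) (size : Int) (n_results : Int) (out : List String) : Prop := out = get_bacnho_comb_preds_alt bn_rows size n_results
instance (bn_rows : List (List Int)) (size : Int) (n_results : Int) (out : List String) : Decidable (Spec_get_bacnho_comb_preds bn_rows size n_results out) := by unfold Spec_get_bacnho_comb_preds; infer_instance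

-- ===== CLAIM (what is proved, stated in full; the proofs are below) =====
def Claim_equal_get_bacnho_comb_preds : Prop := ∀ (bn_rows : List (List Int)) (size : Int) (n_results : Int), Dom_get_bacnho_comb_preds bn_rows size n_results → Pre_get_bacnho_comb_preds bn_rows size n_results → Spec_get_bacnho_comb_preds bn_rows size n_results (get_bacnho_comb_preds bn_rows size n_results)
-- ===== LEMMAS AND PROOFS =====

-- A-side abbreviations (the same terms as in port A's body)
def pvPairKeys (rows : List (List Int)) (j : Int) : List String :=
  (PySem.List.combinations
    (PySem.List.sorted (PySem.List.pyGetD rows (j - 1) []) (fun x => x)) 2).map pvKeyOfPair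

def pvSub (rows : List (List Int)) (c : List Int) (j : Int) : Bool :=
  PySem.Set.issubset (PySem.Set.ofList c) (PySem.Set.ofList (PySem.List.pyGetD rows j []))

def pvMult (rows : List (List Int)) (k : Nat) (j : Int) : Int :=
  pvComb
    (PySem.Set.len (PySem.Set.inter (PySem.Set.ofList (PySem.List.pyGetD rows 0 []))
      (PySem.Set.ofList (PySem.List.pyGetD rows j [])))) (k : Int)

def pvCombs (rows : List (List Int)) (k : Nat) : List (List Int) :=
  PySem.List.combinations
    (PySem.List.sorted (PySem.Set.ofList (PySem.List.pyGetD rows 0 [])) (fun x => x)) k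

def pvR (rows : List (List Int)) : List Int := PySem.List.pyRange 1 rows.length

def pvCnt (rows : List (List Int)) (j : Int) (key : String) : Int :=
  ((pvPairKeys rows j).count key : Int)

def pvDictA (rows : List (List Int)) (k : Nat) : PySem.Dict String Int :=
  (pvCombs rows k).foldl
    (fun d c =>
      (PySem.List.pyRange 1 rows.length).foldl (fun d j =>
        if PySem.Set.issubset (PySem.Set.ofList c)
            (PySem.Set.ofList (PySem.List.pyGetD rows j [])) then
          (PySem.List.combinations
              (PySem.List.sorted (PySem.List.pyGetD rows (j - 1) []) (fun x => x)) 2).foldl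
            (fun d nc => d.modify (pvKeyOfPair nc) 0 (· + 1)) d
        else d) d) PySem.Dict.empty

-- B-side abbreviations (the values computed by port B's body, after loop-shape rewriting)
def pvEntries (rows : List (List Int)) (k : Nat) : List (String × Int) :=
  (pvR rows).flatMap (fun j =>
    if 0 < pvMult rows k j then (pvPairKeys rows j).map (fun key => (key, pvMult rows k j))
    else [])

def pvSumKey (rows : List (List Int)) (k : Nat) (s : String) : Int :=
  (((pvEntries rows k).filter (fun e => e.1 == s)).map (fun e => e.2)).sum

def pvItemsB (rows : List (List Int)) (k : Nat) : List (String × Int) :=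
  (PySem.List.sorted (PySem.Set.ofList ((pvEntries rows k).map (fun e => e.1))) (fun x => x)).map
    (fun s => (s, pvSumKey rows k s))

lemma getD_foldl_modify_key_add (g : List (List Int)) (w : Int) (key : String) :
    ∀ d : PySem.Dict String Int,
      (g.foldl (fun d nc => d.modify (pvKeyOfPair nc) 0 (· + w)) d).getD key 0
        = d.getD key 0 + w * ((g.map pvKeyOfPair).count key : Int) := by
  induction g with
  | nil => intro d; simp
  | cons nc g ih =>
    intro d
    simp only [List.foldl_cons, ih, List.map_cons, List.count_cons]
    rw [PySem.Dict.getD_modify]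
    by_cases hk : key = pvKeyOfPair nc
    · simp [hk]; ring
    · simp [hk, Ne.symm hk]

lemma contains_foldl_modify_key (g : List (List Int)) (w : Int) (key : String) :
    ∀ d : PySem.Dict String Int,
      (g.foldl (fun d nc => d.modify (pvKeyOfPair nc) 0 (· + w)) d).contains key
        = (d.contains key || (g.map pvKeyOfPair).contains key) := by
  induction g with
  | nil => intro d; simp
  | cons nc g ih =>
    intro d
    simp only [List.foldl_cons, ih, PySem.Dict.contains_modify, List.map_cons, List.contains_cons]
    cases d.contains key <;> cases h : (key == pvKeyOfPair nc) <;> simp_all [Bool.or_comm]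

lemma foldl_getD_sum {ι : Type} (l : List ι) (F : PySem.Dict String Int → ι → PySem.Dict String Int)
    (f : ι → Int) (key : String)
    (h : ∀ d i, (F d i).getD key 0 = d.getD key 0 + f i) :
    ∀ d, (l.foldl F d).getD key 0 = d.getD key 0 + (l.map f).sum := by
  induction l with
  | nil => intro d; simp
  | cons i l ih => intro d; simp only [List.foldl_cons, ih, h, List.map_cons, List.sum_cons]; ring

lemma foldl_contains_any {ι : Type} (l : List ι) (F : PySem.Dict String Int → ι → PySem.Dict String Int)
    (G : ι → Bool) (key : String)
    (h : ∀ d i, (F d i).contains key = (d.contains key || G i)) :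
    ∀ d, (l.foldl F d).contains key = (d.contains key || l.any G) := by
  induction l with
  | nil => intro d; simp
  | cons i l ih => intro d; simp only [List.foldl_cons, ih, h, List.any_cons, Bool.or_assoc]

lemma foldl_nodup_keys {ι : Type} (l : List ι) (F : PySem.Dict String Int → ι → PySem.Dict String Int)
    (h : ∀ d i, d.keys.Nodup → (F d i).keys.Nodup) :
    ∀ d, d.keys.Nodup → (l.foldl F d).keys.Nodup := by
  induction l with
  | nil => intro d hd; simpa
  | cons i l ih => intro d hd; exact ih _ (h d i hd)

-- counting the r-combinations of L all of whose elements satisfy p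
lemma countP_combinations_all {α : Type} (p : α → Bool) :
    ∀ (L : List α) (k : Nat),
      (PySem.List.combinations L k).countP (fun c => c.all p)
        = Nat.choose ((L.filter p).length) k := by
  intro L
  induction L with
  | nil => intro k; cases k <;> simp [PySem.List.combinations_zero, PySem.List.combinations_nil_succ]
  | cons x L ih =>
    intro k
    cases k with
    | zero => simp [PySem.List.combinations_zero]
    | succ k =>
      rw [PySem.List.combinations_cons_succ, List.countP_append, List.countP_map]
      by_cases hx : p x = true
      · simp only [List.filter_cons, hx, if_pos]
        have h1 : (List.countP ((fun c => c.all p) ∘ (fun c => x :: c)) (PySem.List.combinations L k))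
            = List.countP (fun c => c.all p) (PySem.List.combinations L k) := by
          apply List.countP_congr; intro c _; simp [Function.comp, hx]
        rw [h1, ih k, ih (k+1)]
        simp [Nat.choose_succ_succ, List.length_cons]
      · simp only [List.filter_cons, hx]
        have h1 : (List.countP ((fun c => c.all p) ∘ (fun c => x :: c)) (PySem.List.combinations L k)) = 0 := by
          rw [List.countP_eq_zero]; intro c _; simp [Function.comp, hx]
        simp [h1, ih (k+1)]

lemma pvComb_aux (m : Nat) (t : Nat) (ht : t ≤ m) :
    (List.map (Nat.cast : Nat → Int) (List.range t)).foldl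
      (fun r i => PySem.Int.floordiv (r * ((m : Int) - i)) (i + 1)) 1 = (Nat.choose m t : Int) := by
  induction t with
  | zero => simp
  | succ t ih =>
    rw [List.range_succ, List.map_append, List.foldl_append, ih (by omega)]
    simp only [List.map_cons, List.map_nil, List.foldl_cons, List.foldl_nil]
    have hmt : (m : Int) - (t : Int) = ((m - t : Nat) : Int) := by
      have h2 : t ≤ m := by omega
      push_cast [h2]; ring
    rw [hmt]
    have h3 : (Nat.choose m t : Int) * ((m - t : Nat) : Int) = ((Nat.choose m t * (m - t) : Nat) : Int) := by
      push_cast; ring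
    rw [h3, ← Nat.choose_succ_right_eq]
    have hpos : (0 : Int) < (t : Int) + 1 := by positivity
    rw [PySem.Int.floordiv_eq_ediv_of_pos hpos]
    have h4 : ((Nat.choose m (t+1) * (t + 1) : Nat) : Int) = (Nat.choose m (t+1) : Int) * ((t : Int) + 1) := by
      push_cast; ring
    rw [h4, Int.mul_ediv_cancel _ (by omega)]

lemma pvComb_choose (m k : Nat) : pvComb (m : Int) (k : Int) = (Nat.choose m k : Int) := by
  unfold pvComb
  by_cases h : m < k
  · rw [if_pos, Nat.choose_eq_zero_of_lt h]; · simp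
    simp only [Bool.or_eq_true, decide_eq_true_eq]
    right; exact_mod_cast h
  · rw [if_neg]
    · rw [PySem.List.pyRange_zero_natCast]
      exact pvComb_aux m k (by omega)
    · simp only [Bool.or_eq_true, decide_eq_true_eq, not_or, not_lt]
      constructor <;> [positivity; exact_mod_cast Nat.le_of_not_lt h]

lemma countP_subsets (xs : List Int) (T : PySem.Set Int) (k : Nat) :
    (PySem.List.combinations (PySem.List.sorted (PySem.Set.ofList xs) (fun x => x)) k).countP
        (fun c => PySem.Set.issubset (PySem.Set.ofList c) T)
      = Nat.choose (PySem.Set.len (PySem.Set.inter (PySem.Set.ofList xs) T)).toNat k := by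
  have hpt : ∀ c ∈ (PySem.List.combinations (PySem.List.sorted (PySem.Set.ofList xs) (fun x => x)) k),
      (PySem.Set.issubset (PySem.Set.ofList c) T = true) ↔ (c.all (fun a => T.contains a) = true) := by
    intro c _
    rw [PySem.Set.issubset_iff, List.all_eq_true]
    constructor
    · intro h a ha
      have := h a ((PySem.Set.mem_ofList c a).2 ha)
      rw [PySem.Set.contains_iff]; exact this
    · intro h a ha
      have := h a ((PySem.Set.mem_ofList c a).1 ha)
      rw [← PySem.Set.contains_iff]; exact this
  rw [List.countP_congr hpt, countP_combinations_all]
  congr 1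
  have hperm : (PySem.List.sorted (PySem.Set.ofList xs) (fun x => x) false).Perm (PySem.Set.ofList xs) :=
    PySem.List.sorted_perm _ _ _
  have := (hperm.filter (fun a => T.contains a)).length_eq
  rw [this]
  simp [PySem.Set.len, PySem.Set.inter]

lemma sum_map_swap {α β : Type} (l1 : List α) (l2 : List β) (f : α → β → Int) :
    (l1.map (fun a => (l2.map (f a)).sum)).sum
      = (l2.map (fun b => (l1.map (fun a => f a b)).sum)).sum := by
  induction l1 with
  | nil => simp
  | cons a l1 ih =>
    rw [List.map_cons, List.sum_cons, ih, ← PySem.List.sum_map_add_int]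
    simp [List.map_cons]

lemma sorted2_lex (xs : List (String × Int)) :
    PySem.List.sorted2 xs (fun x => -x.2) (fun x => x.1)
      = PySem.List.sorted xs (fun x => toLex ((-x.2 : Int), x.1)) := by
  simp only [PySem.List.sorted2, PySem.List.sorted, Bool.false_eq_true, if_false]
  have hb : (fun (a b : String × Int) => decide ((-a.2 : Int) < -b.2) || !decide ((-b.2 : Int) < -a.2) && decide (a.1 < b.1))
      = (fun (a b : String × Int) => decide (toLex ((-a.2 : Int), a.1) < toLex ((-b.2 : Int), b.1))) := by
    funext a b
    rw [Bool.eq_iff_iff]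
    simp only [Bool.or_eq_true, Bool.and_eq_true, Bool.not_eq_true', decide_eq_true_eq,
      decide_eq_false_iff_not, Prod.Lex.lt_iff, ofLex_toLex]
    by_cases hlt : (-a.2 : Int) < -b.2
    · simp [hlt]
    · simp only [hlt, false_or]
      constructor <;> rintro ⟨h1, h2⟩ <;> exact ⟨by omega, h2⟩
  rw [hb]

lemma pv_getD_A (rows : List (List Int)) (k : Nat) (key : String) :
    (pvDictA rows k).getD key 0
      = ((pvCombs rows k).map (fun c =>
          ((pvR rows).map (fun j => if pvSub rows c j then pvCnt rows j key else 0)).sum)).sum := by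
  have hin : ∀ (c : List Int) (d : PySem.Dict String Int) (j : Int),
      ((if PySem.Set.issubset (PySem.Set.ofList c)
            (PySem.Set.ofList (PySem.List.pyGetD rows j [])) then
          (PySem.List.combinations
              (PySem.List.sorted (PySem.List.pyGetD rows (j - 1) []) (fun x => x)) 2).foldl
            (fun d nc => d.modify (pvKeyOfPair nc) 0 (· + 1)) d
        else d) : PySem.Dict String Int).getD key 0
        = d.getD key 0 + (if pvSub rows c j then pvCnt rows j key else 0) := by
    intro c d j
    by_cases hs : pvSub rows c j
    · rw [if_pos, if_pos hs, getD_foldl_modify_key_add, one_mul]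
      · rfl
      · exact hs
    · rw [if_neg, if_neg hs, add_zero]
      exact hs
  have hout : ∀ (d : PySem.Dict String Int) (c : List Int),
      ((PySem.List.pyRange 1 rows.length).foldl (fun d j =>
        if PySem.Set.issubset (PySem.Set.ofList c)
            (PySem.Set.ofList (PySem.List.pyGetD rows j [])) then
          (PySem.List.combinations
              (PySem.List.sorted (PySem.List.pyGetD rows (j - 1) []) (fun x => x)) 2).foldl
            (fun d nc => d.modify (pvKeyOfPair nc) 0 (· + 1)) d
        else d) d).getD key 0
        = d.getD key 0 + ((pvR rows).map (fun j => if pvSub rows c j then pvCnt rows j key else 0)).sum :=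
    fun d c => foldl_getD_sum _ _ _ key (hin c) d
  rw [pvDictA, foldl_getD_sum _ _ _ key hout, PySem.Dict.getD_empty, zero_add]

lemma pv_contains_A (rows : List (List Int)) (k : Nat) (key : String) :
    (pvDictA rows k).contains key
      = (pvCombs rows k).any (fun c =>
          (pvR rows).any (fun j => pvSub rows c j && (pvPairKeys rows j).contains key)) := by
  have hin : ∀ (c : List Int) (d : PySem.Dict String Int) (j : Int),
      ((if PySem.Set.issubset (PySem.Set.ofList c)
            (PySem.Set.ofList (PySem.List.pyGetD rows j [])) then
          (PySem.List.combinations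
              (PySem.List.sorted (PySem.List.pyGetD rows (j - 1) []) (fun x => x)) 2).foldl
            (fun d nc => d.modify (pvKeyOfPair nc) 0 (· + 1)) d
        else d) : PySem.Dict String Int).contains key
        = (d.contains key || (pvSub rows c j && (pvPairKeys rows j).contains key)) := by
    intro c d j
    by_cases hs : pvSub rows c j
    · rw [if_pos, contains_foldl_modify_key, hs, Bool.true_and]
      · rfl
      · exact hs
    · rw [if_neg, Bool.eq_false_iff.2 hs, Bool.false_and, Bool.or_false]
      exact hs
  have hout : ∀ (d : PySem.Dict String Int) (c : List Int),
      ((PySem.List.pyRange 1 rows.length).foldl (fun d j =>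
        if PySem.Set.issubset (PySem.Set.ofList c)
            (PySem.Set.ofList (PySem.List.pyGetD rows j [])) then
          (PySem.List.combinations
              (PySem.List.sorted (PySem.List.pyGetD rows (j - 1) []) (fun x => x)) 2).foldl
            (fun d nc => d.modify (pvKeyOfPair nc) 0 (· + 1)) d
        else d) d).contains key
        = (d.contains key || (pvR rows).any (fun j => pvSub rows c j && (pvPairKeys rows j).contains key)) :=
    fun d c => foldl_contains_any _ _ _ key (hin c) d
  rw [pvDictA, foldl_contains_any _ _ _ key hout, PySem.Dict.contains_empty, Bool.false_or]

lemma pv_countP (rows : List (List Int)) (k : Nat) (j : Int) :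
    (((pvCombs rows k).countP (fun c => pvSub rows c j) : Nat) : Int) = pvMult rows k j := by
  unfold pvCombs pvSub pvMult
  rw [countP_subsets]
  have hlen : PySem.Set.len (PySem.Set.inter (PySem.Set.ofList (PySem.List.pyGetD rows 0 []))
      (PySem.Set.ofList (PySem.List.pyGetD rows j [])))
      = (((PySem.Set.len (PySem.Set.inter (PySem.Set.ofList (PySem.List.pyGetD rows 0 []))
          (PySem.Set.ofList (PySem.List.pyGetD rows j [])))).toNat : Nat) : Int) := by
    simp [PySem.Set.len]
  rw [hlen, pvComb_choose]
  simp

lemma pv_mult_nonneg (rows : List (List Int)) (k : Nat) (j : Int) : 0 ≤ pvMult rows k j := by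
  rw [← pv_countP]; positivity

lemma pv_nodup_A (rows : List (List Int)) (k : Nat) : (pvDictA rows k).keys.Nodup := by
  rw [pvDictA]
  apply foldl_nodup_keys _ _ ?_ _ PySem.Dict.nodup_keys_empty
  intro d c hd
  apply foldl_nodup_keys _ _ ?_ _ hd
  intro d j hd2
  split_ifs with hs
  · exact PySem.Dict.nodup_keys_foldl_modify_key _ pvKeyOfPair 0 (fun _ _ => (· + 1)) _ hd2
  · exact hd2

-- B-side lemmas

lemma pvPairKeysRec_eq (L : List Int) :
    pvPairKeysRec L = (PySem.List.combinations L 2).map pvKeyOfPair := by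
  induction L with
  | nil => simp [pvPairKeysRec, PySem.List.combinations_nil_succ]
  | cons x t ih =>
    rw [pvPairKeysRec, PySem.List.combinations_cons_succ, List.map_append, ← ih,
      PySem.List.combinations_one, List.map_map, List.map_map]
    rfl

lemma pv_foldl_ite_append {ι α : Type} (l : List ι) (p : ι → Prop) [DecidablePred p]
    (g : ι → List α) :
    ∀ acc : List α,
      l.foldl (fun acc x => if p x then acc ++ g x else acc) acc
        = acc ++ l.flatMap (fun x => if p x then g x else []) := by
  induction l with
  | nil => intro acc; simp
  | cons x l ih =>
    intro acc
    rw [List.foldl_cons, List.flatMap_cons]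
    split_ifs with h
    · rw [ih, List.append_assoc]
    · rw [ih, List.nil_append]

lemma sum_map_filter_flatMap {ι α : Type} (l : List ι) (g : ι → List α) (p : α → Bool)
    (f : α → Int) :
    ((((l.flatMap g).filter p).map f).sum)
      = (l.map (fun i => (((g i).filter p).map f).sum)).sum := by
  induction l with
  | nil => simp
  | cons i l ih =>
    rw [List.flatMap_cons, List.filter_append, List.map_append, List.sum_append, ih,
      List.map_cons, List.sum_cons]

lemma key_weight_sum (L : List String) (m : Int) (s : String) :
    (((L.map (fun key => (key, m))).filter (fun e => e.1 == s)).map (fun e => e.2)).sum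
      = m * (L.count s : Int) := by
  induction L with
  | nil => simp
  | cons x t ih =>
    rw [List.map_cons, List.filter_cons]
    by_cases h : x = s
    · simp only [h, List.count_cons, beq_self_eq_true, if_pos, List.map_cons, List.sum_cons, ih]
      push_cast; ring
    · have hb : ((x, m).1 == s) = false := by simpa using h
      have hb2 : (s == x) = false := by simpa using Ne.symm h
      simp only [hb, Bool.false_eq_true, if_false, ih, List.count_cons]
      simp

lemma pv_sumKey_eq_getD (rows : List (List Int)) (k : Nat) (s : String) :
    pvSumKey rows k s = (pvDictA rows k).getD s 0 := by
  rw [pv_getD_A, sum_map_swap]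
  unfold pvSumKey pvEntries
  rw [sum_map_filter_flatMap]
  apply congrArg List.sum
  apply List.map_congr_left
  intro j _
  by_cases hm : 0 < pvMult rows k j
  · rw [if_pos hm, key_weight_sum]
    have hfac : (fun c => if pvSub rows c j then pvCnt rows j s else 0)
        = (fun c => (if pvSub rows c j then (1 : Int) else 0) * pvCnt rows j s) := by
      funext c; split_ifs <;> ring
    rw [hfac, List.sum_map_mul_right, PySem.List.sum_map_ite_one_zero, pv_countP]
    rfl
  · have hz : pvMult rows k j = 0 := le_antisymm (not_lt.1 hm) (pv_mult_nonneg rows k j)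
    rw [if_neg hm]
    have hfac : (fun c => if pvSub rows c j then pvCnt rows j s else 0)
        = (fun c => (if pvSub rows c j then (1 : Int) else 0) * pvCnt rows j s) := by
      funext c; split_ifs <;> ring
    rw [hfac, List.sum_map_mul_right, PySem.List.sum_map_ite_one_zero, pv_countP, hz]
    simp

lemma pv_entries_fst (rows : List (List Int)) (k : Nat) :
    (pvEntries rows k).map (fun e => e.1)
      = (pvR rows).flatMap (fun j => if 0 < pvMult rows k j then pvPairKeys rows j else []) := by
  unfold pvEntries
  rw [List.map_flatMap]
  congr 1
  funext j
  split_ifs with h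
  · have hid : ((fun e : String × Int => e.1) ∘ fun key => (key, pvMult rows k j))
        = (fun x : String => x) := rfl
    rw [List.map_map, hid, List.map_id']
  · simp

lemma pv_mem_keys (rows : List (List Int)) (k : Nat) (s : String) :
    s ∈ (pvEntries rows k).map (fun e => e.1) ↔ (pvDictA rows k).contains s = true := by
  rw [pv_contains_A, pv_entries_fst]
  simp only [List.mem_flatMap, List.any_eq_true, Bool.and_eq_true]
  constructor
  · rintro ⟨j, hj, hs⟩
    by_cases hm : 0 < pvMult rows k j
    · rw [if_pos hm] at hs
      have hm' : 0 < (pvCombs rows k).countP (fun c => pvSub rows c j) := by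
        rw [← pv_countP] at hm
        exact_mod_cast hm
      obtain ⟨c, hcm, hsub⟩ := List.countP_pos_iff.1 hm'
      refine ⟨c, hcm, j, hj, hsub, ?_⟩
      simpa using hs
    · rw [if_neg hm] at hs
      cases hs
  · rintro ⟨c, hc, j, hj, hsub, hcont⟩
    refine ⟨j, hj, ?_⟩
    have hm : 0 < pvMult rows k j := by
      rw [← pv_countP]
      exact_mod_cast List.countP_pos_iff.2 ⟨c, hc, hsub⟩
    rw [if_pos hm]
    simpa using hcont

lemma pv_nodup_itemsB (rows : List (List Int)) (k : Nat) : (pvItemsB rows k).Nodup := by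
  unfold pvItemsB
  refine List.Nodup.map (fun a b h => congrArg Prod.fst h) ?_
  exact ((PySem.List.sorted_perm _ _ _).symm).nodup (PySem.Set.nodup_ofList _)

lemma pv_items_perm (rows : List (List Int)) (k : Nat) :
    (pvDictA rows k).items.Perm (pvItemsB rows k) := by
  have hnA := pv_nodup_A rows k
  have hiA : (pvDictA rows k).items.Nodup := List.Nodup.of_map _ hnA
  rw [List.perm_ext_iff_of_nodup hiA (pv_nodup_itemsB rows k)]
  rintro ⟨s, v⟩
  rw [← PySem.Dict.get?_eq_some_iff_mem_items _ _ _ hnA]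
  unfold pvItemsB
  constructor
  · intro hg
    have hc : (pvDictA rows k).contains s = true := by
      rw [PySem.Dict.contains_eq_isSome_get?, hg]; rfl
    have hv : (pvDictA rows k).getD s 0 = v := PySem.Dict.getD_of_get?_eq_some _ _ hg
    refine List.mem_map.2 ⟨s, ?_, ?_⟩
    · rw [PySem.List.mem_sorted]
      exact (PySem.Set.mem_ofList _ _).2 ((pv_mem_keys rows k s).2 hc)
    · rw [pv_sumKey_eq_getD, hv]
  · intro hmem
    obtain ⟨a, ha, heq⟩ := List.mem_map.1 hmem
    obtain ⟨rfl, rfl⟩ : a = s ∧ pvSumKey rows k a = v := by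
      constructor
      · exact congrArg Prod.fst heq
      · exact congrArg Prod.snd heq
    have hc : (pvDictA rows k).contains a = true := by
      apply (pv_mem_keys rows k a).1
      rw [PySem.List.mem_sorted] at ha
      exact (PySem.Set.mem_ofList _ _).1 ha
    cases hg : (pvDictA rows k).get? a with
    | none =>
      rw [PySem.Dict.contains_eq_isSome_get?, hg] at hc
      simp at hc
    | some w =>
      have hv : (pvDictA rows k).getD a 0 = w := PySem.Dict.getD_of_get?_eq_some _ _ hg
      rw [pv_sumKey_eq_getD, hv]

lemma pv_main (rows : List (List Int)) (k : Nat) (nr : Int) :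
    (PySem.List.slice
      (PySem.List.sorted2 (pvDictA rows k).items (fun x => -x.2) (fun x => x.1))
      none (some nr)).map (fun x => x.1)
    = (PySem.List.slice
      (PySem.List.sorted2 (pvItemsB rows k) (fun x => -x.2) (fun x => x.1))
      none (some nr)).map (fun x => x.1) := by
  have hs : PySem.List.sorted2 (pvDictA rows k).items (fun x => -x.2) (fun x => x.1)
      = PySem.List.sorted2 (pvItemsB rows k) (fun x => -x.2) (fun x => x.1) := by
    rw [sorted2_lex, sorted2_lex]
    apply PySem.List.sorted_eq_sorted_of_perm
    · intro p q h
      have h' := congrArg ofLex h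
      simp only [ofLex_toLex, Prod.mk.injEq] at h'
      exact Prod.ext h'.2 (by omega)
    · exact pv_items_perm rows k
  rw [hs]

lemma pv_entries_foldl (rows : List (List Int)) (k : Nat) :
    (PySem.List.pyRange 1 rows.length).foldl (fun es j =>
        if 0 < pvComb
            (PySem.Set.len (PySem.Set.inter (PySem.Set.ofList (PySem.List.pyGetD rows 0 []))
              (PySem.Set.ofList (PySem.List.pyGetD rows j [])))) (k : Int) then
          es ++ (pvPairKeysRec
            (PySem.List.sorted (PySem.List.pyGetD rows (j - 1) []) (fun x => x))).map
              (fun key => (key, pvComb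
                (PySem.Set.len (PySem.Set.inter (PySem.Set.ofList (PySem.List.pyGetD rows 0 []))
                  (PySem.Set.ofList (PySem.List.pyGetD rows j [])))) (k : Int)))
        else es) []
      = pvEntries rows k := by
  rw [pv_foldl_ite_append
    (p := fun j => 0 < pvComb
      (PySem.Set.len (PySem.Set.inter (PySem.Set.ofList (PySem.List.pyGetD rows 0 []))
        (PySem.Set.ofList (PySem.List.pyGetD rows j [])))) (k : Int))
    (g := fun j => (pvPairKeysRec
        (PySem.List.sorted (PySem.List.pyGetD rows (j - 1) []) (fun x => x))).map
          (fun key => (key, pvComb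
            (PySem.Set.len (PySem.Set.inter (PySem.Set.ofList (PySem.List.pyGetD rows 0 []))
              (PySem.Set.ofList (PySem.List.pyGetD rows j [])))) (k : Int)))),
    List.nil_append]
  unfold pvEntries pvR
  congr 1
  funext j
  rw [pvPairKeysRec_eq]
  rfl

lemma pv_alt_eq (rows : List (List Int)) (k : Nat) (nr : Int) (hlen : ¬ rows.length < 2) :
    get_bacnho_comb_preds_alt rows (k : Int) nr
      = (PySem.List.slice
          (PySem.List.sorted2 (pvItemsB rows k) (fun x => -x.2) (fun x => x.1))
          none (some nr)).map (fun x => x.1) := by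
  unfold get_bacnho_comb_preds_alt
  rw [if_neg hlen]
  simp only [pv_entries_foldl rows k]
  rfl

-- ===== VERDICT (by name: the statement is the Claim_ definition above) =====
theorem get_bacnho_comb_preds_spec : Claim_equal_get_bacnho_comb_preds := by
  intro rows size nr _ hpre
  unfold Spec_get_bacnho_comb_preds
  by_cases hlen : rows.length < 2
  · simp [get_bacnho_comb_preds, get_bacnho_comb_preds_alt, hlen]
  · have hsz : 0 ≤ size := hpre.resolve_left hlen
    obtain ⟨k, rfl⟩ : ∃ k : Nat, size = (k : Int) := ⟨size.toNat, (Int.toNat_of_nonneg hsz).symm⟩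
    rw [pv_alt_eq rows k nr hlen]
    simp only [get_bacnho_comb_preds, if_neg hlen, Int.toNat_natCast]
    exact pv_main rows k nr
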